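-- pv_equiv track=rewrite | github.com/JakeSaunders1995/comp16321MarkingMid | CW_rugby/rugby_h64203za/rugby_h64203za.py | scoreCheck
-- ===== SOURCE A (Python) =====
-- def scoreCheck(team):
--     x = 0
--     for i in range(len(team)):
--         if team[i] == "t":
--             x += 5
--         elif team[i] == "c":
--             x += 2
--         elif team[i] == "p":
--             x += 3
--         elif team[i] == "d":
--             x += 3
--     return x
-- ===== SOURCE B (Python) =====
-- PTS = {"t": 5, "c": 2, "p": 3, "d": 3}
--
-- def scoreCheck(team):
--     def go(seg):
--         if not seg:
--             return 0
--         if len(seg) == 1: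
--             return PTS.get(seg[0], 0)
--         mid = len(seg) // 2
--         return go(seg[:mid]) + go(seg[mid:])
--     return go(list(team))
-- ===== Notes on version B (the rewrite author's own statement) =====
-- stated objective: alternative
-- what changed: Replaces the sequential branching accumulator loop with a divide-and-conquer recursion: split the event list in half, score each half recursively, and add, with per-event points read from a table at the leaves.
import Mathlib
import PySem

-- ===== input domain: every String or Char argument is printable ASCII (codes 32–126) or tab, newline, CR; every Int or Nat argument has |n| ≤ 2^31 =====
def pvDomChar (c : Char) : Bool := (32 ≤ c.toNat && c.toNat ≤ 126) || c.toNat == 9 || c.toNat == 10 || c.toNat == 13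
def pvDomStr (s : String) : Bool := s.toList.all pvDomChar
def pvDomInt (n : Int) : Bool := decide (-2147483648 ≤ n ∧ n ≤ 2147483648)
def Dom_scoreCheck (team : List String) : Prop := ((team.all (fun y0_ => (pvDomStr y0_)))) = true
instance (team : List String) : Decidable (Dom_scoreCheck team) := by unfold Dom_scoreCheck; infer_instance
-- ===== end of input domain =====

-- B scores by divide-and-conquer (split in half, recurse, add) with a points table at the leaves,
-- instead of A's sequential branching accumulator; same result, same cost.
-- ===== PORT A =====
def scoreCheck (team : List String) : Int :=
  (PySem.List.pyRange 0 (team.length : Int) 1).foldl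
    (fun x i =>
      let s := PySem.List.pyGetD team i ""
      if s = "t" then x + 5
      else if s = "c" then x + 2
      else if s = "p" then x + 3
      else if s = "d" then x + 3
      else x) 0

-- ===== PORT B =====
def ptsTable : PySem.Dict String Int :=
  PySem.Dict.ofList [("t", 5), ("c", 2), ("p", 3), ("d", 3)]

-- fuel-based divide and conquer (fuel = seg.length suffices: each half is strictly shorter)
def scoreGo : Nat → List String → Int
  | _, [] => 0
  | _, [s] => ptsTable.getD (PySem.List.pyGetD [s] 0 "") 0
  | fuel + 1, seg =>
    scoreGo fuel (seg.take (seg.length / 2)) + scoreGo fuel (seg.drop (seg.length / 2))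
  | 0, _ => 0  -- never reached when fuel ≥ seg.length

def scoreCheck_alt (team : List String) : Int := scoreGo team.length team

-- ===== PRECONDITION & SPEC =====
def Spec_scoreCheck (team : List String) (out : Int) : Prop := out = scoreCheck_alt team
instance (team : List String) (out : Int) : Decidable (Spec_scoreCheck team out) := by unfold Spec_scoreCheck; infer_instance

-- ===== CLAIM (what is proved, stated in full; the proofs are below) =====
def Claim_equal_scoreCheck : Prop := ∀ (team : List String), Dom_scoreCheck team → Spec_scoreCheck team (scoreCheck team)

-- ===== LEMMAS AND PROOFS =====
theorem pts_items : ptsTable = PySem.Dict.mk [("t",5),("c",2),("p",3),("d",3)] := by decide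

theorem pts_getD (s : String) :
    ptsTable.getD s 0 =
      (if s = "t" then 5 else if s = "c" then 2 else if s = "p" then 3
       else if s = "d" then (3 : Int) else 0) := by
  by_cases h1 : s = "t"
  · subst h1; decide
  by_cases h2 : s = "c"
  · subst h2; decide
  by_cases h3 : s = "p"
  · subst h3; decide
  by_cases h4 : s = "d"
  · subst h4; decide
  simp [pts_items, PySem.Dict.getD_eq_get?_getD, PySem.Dict.get?,
        h1, h2, h3, h4, Ne.symm h1, Ne.symm h2, Ne.symm h3, Ne.symm h4]

theorem scoreGo_sum (fuel : Nat) (seg : List String) (hf : seg.length ≤ fuel) :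
    scoreGo fuel seg = (seg.map (fun s => ptsTable.getD s 0)).sum := by
  induction fuel generalizing seg with
  | zero =>
    match seg, hf with
    | [], _ => rfl
  | succ n ih =>
    match seg, hf with
    | [], _ => rfl
    | [s], _ => simp [scoreGo, PySem.List.pyGetD_zero_cons]
    | a :: b :: tl, hf =>
      have hlen : 2 ≤ (a :: b :: tl).length := by simp
      have hstep : scoreGo (n + 1) (a :: b :: tl) =
          scoreGo n ((a :: b :: tl).take ((a :: b :: tl).length / 2)) +
          scoreGo n ((a :: b :: tl).drop ((a :: b :: tl).length / 2)) := rfl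
      rw [hstep, ih _ (by simp_all; omega), ih _ (by simp_all; omega)]
      rw [← List.sum_append, ← List.map_append, List.take_append_drop]

theorem foldl_weights (seg : List String) (a : Int) :
    seg.foldl
      (fun x s =>
        if s = "t" then x + 5
        else if s = "c" then x + 2
        else if s = "p" then x + 3
        else if s = "d" then x + 3
        else x) a
    = a + (seg.map (fun s => ptsTable.getD s 0)).sum := by
  induction seg generalizing a with
  | nil => simp
  | cons h tl ih =>
    simp only [List.foldl_cons, List.map_cons, List.sum_cons, ih, pts_getD]
    split_ifs <;> ring

-- ===== VERDICT (by name: the statement is the Claim_ definition above) =====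
theorem scoreCheck_spec : Claim_equal_scoreCheck := by
  intro team _
  unfold Spec_scoreCheck scoreCheck scoreCheck_alt
  rw [PySem.List.foldl_pyRange_zero_pyGetD' team ""
       (fun x s =>
        if s = "t" then x + 5
        else if s = "c" then x + 2
        else if s = "p" then x + 3
        else if s = "d" then x + 3
        else x) 0]
  rw [foldl_weights, scoreGo_sum team.length team le_rfl]
  ring
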